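-- pv_equiv track=rewrite | github.com/junior-mafia/akiya-mart | app/tasks/spiders/nifty_details.py | dedupe
-- ===== SOURCE A (Python) =====
-- def dedupe(items):
--     seen = set()
--     return [
--         x
--         for x in items
--         if not (x["bukken_id"], x["source"]) in seen
--         and not seen.add((x["bukken_id"], x["source"]))
--     ]
-- ===== SOURCE B (Python) =====
-- def dedupe(items):
--     out = []
--     for i, x in enumerate(items):
--         key = (x["bukken_id"], x["source"])
--         if all((y["bukken_id"], y["source"]) != key for y in items[:i]):
--             out.append(x)
--     return out
-- ===== Notes on version B (the rewrite author's own statement) =====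
-- stated objective: alternative
-- what changed: Drops the auxiliary seen-set entirely: B keeps item i iff no item in the prefix items[:i] has the same (bukken_id, source) key, a quadratic lookback into the input instead of A's hash-set single pass.
import Mathlib
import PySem

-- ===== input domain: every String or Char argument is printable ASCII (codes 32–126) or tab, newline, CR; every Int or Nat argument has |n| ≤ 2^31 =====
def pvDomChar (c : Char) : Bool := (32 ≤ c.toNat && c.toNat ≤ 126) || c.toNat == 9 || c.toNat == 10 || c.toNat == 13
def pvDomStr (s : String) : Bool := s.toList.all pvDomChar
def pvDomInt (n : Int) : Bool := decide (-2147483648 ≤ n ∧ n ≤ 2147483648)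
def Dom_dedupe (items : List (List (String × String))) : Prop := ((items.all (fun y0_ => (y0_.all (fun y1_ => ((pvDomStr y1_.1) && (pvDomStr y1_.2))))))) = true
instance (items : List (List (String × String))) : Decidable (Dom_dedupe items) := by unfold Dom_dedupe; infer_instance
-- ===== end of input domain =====

-- B drops A's seen-set single pass: it keeps item i iff no item in the prefix items[:i]
-- shares its (bukken_id, source) key (quadratic lookback; alternative, not faster).


-- shared key extraction: (x["bukken_id"], x["source"]); none where Python raises KeyError
def pvKey (x : List (String × String)) : Option (String × String) :=
  match (PySem.Dict.mk x).get? "bukken_id", (PySem.Dict.mk x).get? "source" with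
  | some b, some s => some (b, s)
  | _, _ => none

-- ===== PORT A =====
-- loop state: (seen set, output list built so far); 'not seen.add(k)' is the append to seen
def dedupeStep (st : PySem.Set (String × String) × List (List (String × String)))
    (x : List (String × String)) : PySem.Set (String × String) × List (List (String × String)) :=
  match pvKey x with
  | some k => if PySem.Set.contains st.1 k then st else (PySem.Set.add st.1 k, st.2 ++ [x])
  | none => st  -- KeyError in Python; excluded by Pre_dedupe

def dedupe (items : List (List (String × String))) : List (List (String × String)) :=
  (items.foldl dedupeStep (PySem.Set.empty, [])).2

-- ===== PORT B =====
-- for i, x in enumerate(items): keep x iff every y in items[:i] has a different key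
def dedupe_alt (items : List (List (String × String))) : List (List (String × String)) :=
  (PySem.List.enumerate items).foldl
    (fun out p =>
      match pvKey p.2 with
      | some k =>
        if (PySem.List.slice items none (some p.1)).all (fun y => pvKey y != some k)
        then out ++ [p.2] else out
      | none => out)  -- KeyError in Python; excluded by Pre_dedupe
    []

-- ===== PRECONDITION & SPEC =====
-- Pre_ excludes exactly the items missing the "bukken_id" or "source" key, where Python A raises KeyError
def Pre_dedupe (items : List (List (String × String))) : Prop :=
  ∀ x ∈ items, (PySem.Dict.mk x).contains "bukken_id" = true ∧ (PySem.Dict.mk x).contains "source" = true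
instance (items : List (List (String × String))) : Decidable (Pre_dedupe items) := by unfold Pre_dedupe; infer_instance

def pvWitness_dedupe : (List (List (String × String))) :=
  [[("bukken_id", "1"), ("source", "n")], [("bukken_id", "1"), ("source", "n"), ("p", "9")]]

def Spec_dedupe (items : List (List (String × String))) (out : List (List (String × String))) : Prop := out = dedupe_alt items
instance (items : List (List (String × String))) (out : List (List (String × String))) : Decidable (Spec_dedupe items out) := by unfold Spec_dedupe; infer_instance

-- ===== CLAIM (what is proved, stated in full; the proofs are below) =====
def Claim_equal_dedupe : Prop := ∀ (items : List (List (String × String))), Dom_dedupe items → Pre_dedupe items → Spec_dedupe items (dedupe items)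

-- ===== LEMMAS AND PROOFS =====

-- proof-side recursive description of "keep iff no earlier item shares the key"
def pvGo (pre suf : List (List (String × String))) : List (List (String × String)) :=
  match suf with
  | [] => []
  | x :: t =>
    if pre.all (fun y => pvKey y != pvKey x)
    then x :: pvGo (pre ++ [x]) t
    else pvGo (pre ++ [x]) t

lemma pvKey_isSome (x : List (String × String))
    (h1 : (PySem.Dict.mk x).contains "bukken_id" = true)
    (h2 : (PySem.Dict.mk x).contains "source" = true) : (pvKey x).isSome := by
  rw [PySem.Dict.contains_eq_isSome_get?] at h1 h2
  unfold pvKey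
  cases hb : (PySem.Dict.mk x).get? "bukken_id" <;> cases hs : (PySem.Dict.mk x).get? "source" <;>
    simp_all

lemma set_contains_add (s : PySem.Set (String × String)) (a b : String × String) :
    PySem.Set.contains (PySem.Set.add s a) b =
      (PySem.Set.contains s b || (a == b)) := by
  simp only [PySem.Set.add]
  by_cases hab : a = b
  · subst hab
    by_cases h : PySem.Set.contains s a = true
    · rw [if_pos h]
      have hm := List.mem_of_elem_eq_true h
      simp [hm]
    · rw [if_neg h]; simp [PySem.Set.contains]
  · by_cases h : PySem.Set.contains s a = true
    · rw [if_pos h]; simp [PySem.Set.contains, beq_iff_eq, hab]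
    · rw [if_neg h]
      simp [PySem.Set.contains, List.mem_append, beq_iff_eq, hab, Ne.symm hab]

-- A's fold computes pvGo: the seen set is exactly "some key in pre"
lemma A_go (suf : List (List (String × String))) :
    ∀ (pre : List (List (String × String))) (S : PySem.Set (String × String))
      (out : List (List (String × String))),
      (∀ x ∈ suf, (pvKey x).isSome) →
      (∀ k, PySem.Set.contains S k = pre.any (fun y => pvKey y == some k)) →
      (suf.foldl dedupeStep (S, out)).2 = out ++ pvGo pre suf := by
  induction suf with
  | nil => intro pre S out _ _; simp [pvGo]
  | cons x t ih =>
    intro pre S out hsome hinv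
    obtain ⟨k, hk⟩ := Option.isSome_iff_exists.mp (hsome x (by simp))
    simp only [List.foldl_cons, pvGo, hk]
    have hcond : (pre.all (fun y => pvKey y != some k)) = !(PySem.Set.contains S k) := by
      rw [hinv k]
      simp [List.all_eq_not_any_not, bne, Bool.not_not]
    by_cases hc : PySem.Set.contains S k = true
    · have hstep : dedupeStep (S, out) x = (S, out) := by
        simp only [dedupeStep, hk]; rw [if_pos hc]
      rw [hstep, hcond, hc]
      rw [Bool.not_true, if_neg Bool.false_ne_true]
      apply ih _ _ _ (fun y hy => hsome y (by simp [hy]))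
      intro k'
      rw [hinv k', List.any_append]
      by_cases hkk : k = k'
      · subst hkk
        have hpk : pre.any (fun y => pvKey y == some k) = true := by rw [← hinv k]; exact hc
        simp [hpk, hk]
      · simp [hk, beq_iff_eq, hkk]
    · have hc' : PySem.Set.contains S k = false := by simpa using hc
      have hstep : dedupeStep (S, out) x = (PySem.Set.add S k, out ++ [x]) := by
        simp only [dedupeStep, hk]; rw [if_neg hc]
      rw [hstep, hcond, hc']
      simp only [Bool.not_false, if_true]
      have hinv' : ∀ k', PySem.Set.contains (PySem.Set.add S k) k' =
          (pre ++ [x]).any (fun y => pvKey y == some k') := by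
        intro k'
        rw [set_contains_add, hinv k', List.any_append]
        simp [hk]
      rw [ih _ _ _ (fun y hy => hsome y (by simp [hy])) hinv']
      simp

-- B's fold over enumerate computes pvGo: the slice items[:i] is the processed prefix
lemma B_go (suf : List (List (String × String))) :
    ∀ (pre out : List (List (String × String))),
      (∀ x ∈ suf, (pvKey x).isSome) →
      (PySem.List.enumerate suf (pre.length : Int)).foldl
        (fun out p =>
          match pvKey p.2 with
          | some k =>
            if (PySem.List.slice (pre ++ suf) none (some p.1)).all (fun y => pvKey y != some k)
            then out ++ [p.2] else out
          | none => out) out = out ++ pvGo pre suf := by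
  induction suf with
  | nil => intro pre out _; simp [pvGo, PySem.List.enumerate_nil]
  | cons x t ih =>
    intro pre out hsome
    obtain ⟨k, hk⟩ := Option.isSome_iff_exists.mp (hsome x (by simp))
    rw [PySem.List.enumerate_cons, List.foldl_cons]
    have hslice : PySem.List.slice (pre ++ x :: t) none (some (pre.length : Int)) = pre := by
      rw [PySem.List.slice_to_natCast]
      simp
    have happ : pre ++ x :: t = (pre ++ [x]) ++ t := by simp
    have hlen : (pre.length : Int) + 1 = ((pre ++ [x]).length : Int) := by
      push_cast [List.length_append, List.length_singleton]
      ring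
    simp only [hk, hslice]
    have hrec : ∀ out', (PySem.List.enumerate t ((pre.length : Int) + 1)).foldl
        (fun out p =>
          match pvKey p.2 with
          | some k =>
            if (PySem.List.slice (pre ++ x :: t) none (some p.1)).all (fun y => pvKey y != some k)
            then out ++ [p.2] else out
          | none => out) out' = out' ++ pvGo (pre ++ [x]) t := by
      intro out'
      rw [hlen, happ]
      exact ih (pre ++ [x]) out' (fun y hy => hsome y (by simp [hy]))
    by_cases hc : (pre.all (fun y => pvKey y != some k)) = true
    · rw [if_pos hc, hrec]
      simp [pvGo, hk, hc]
    · rw [if_neg hc, hrec]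
      simp only [pvGo, hk]
      rw [if_neg hc]

-- ===== VERDICT (by name: the statement is the Claim_ definition above) =====
theorem dedupe_spec : Claim_equal_dedupe := by
  intro items _ hpre
  show dedupe items = dedupe_alt items
  have hsome : ∀ x ∈ items, (pvKey x).isSome := fun x hx =>
    pvKey_isSome x (hpre x hx).1 (hpre x hx).2
  have hA : dedupe items = [] ++ pvGo [] items := by
    unfold dedupe
    exact A_go items [] PySem.Set.empty [] hsome (by intro k; simp [PySem.Set.contains, PySem.Set.empty])
  have hB : dedupe_alt items = [] ++ pvGo [] items := by
    unfold dedupe_alt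
    have := B_go items [] [] hsome
    simpa using this
  rw [hA, hB]
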